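-- pv_equiv track=rewrite | github.com/YarnexNexo/Robot_IA_v24 | registro.py | cordenadas_XY_Rey
-- ===== SOURCE A (Python) =====
-- def cordenadas_XY_Rey(x,y,lista_Obstaculos_XY,col,ren):
--     a_x = []
--     a_y = []
--     a = []
--
--     l_x = [x,x-1,x+1,x-1,x,x-1,x+1,x+1]
--     l_y = [y-1,y,y,y+1,y+1,y-1,y+1,y-1]
--     for g in range(len(l_x)):
--         if(l_x[g] >= 0 and l_x[g] < ren and l_y[g] >= 0 and l_y[g] < col):
--             a_x.append(l_x[g])
--             a_y.append(l_y[g])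
--     l_x = a_x
--     l_y = a_y
--
--     t_x = []
--     t_y = []
--
--     bandera = True
--     for h in range(len(l_x)):
--         for f in range(len(lista_Obstaculos_XY[1])):
--             if(l_x[h] == lista_Obstaculos_XY[0][f] and l_y[h] == lista_Obstaculos_XY[1][f]):
--                 #print l_x[h],lista_Obstaculos_XY[0][f],l_y[h],lista_Obstaculos_XY[1][f]
--                 t_x.append(l_x[h])
--                 t_y.append(l_y[h])
--
--     for q in range(len(t_x)):
--         for w in range(len(a_x)):
--             if(t_x[q] == l_x[w] and t_y[q] == l_y[w]):
--                 l_x.pop(w)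
--                 l_y.pop(w)
--                 break
--     a_x = l_x
--     a_y = l_y
--
--     a.append(a_x)
--     a.append(a_y)
--     return a
-- ===== SOURCE B (Python) =====
-- def cordenadas_XY_Rey(x,y,lista_Obstaculos_XY,col,ren):
--     obs = {(lista_Obstaculos_XY[0][f], lista_Obstaculos_XY[1][f])
--            for f in range(len(lista_Obstaculos_XY[1]))}
--     xs = []
--     ys = []
--     for dx, dy in ((0,-1),(-1,0),(1,0),(-1,1),(0,1),(-1,-1),(1,1),(1,-1)):
--         nx = x + dx
--         ny = y + dy
--         if 0 <= nx < ren and 0 <= ny < col and (nx, ny) not in obs: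
--             xs.append(nx)
--             ys.append(ny)
--     return [xs, ys]
-- ===== Notes on version B (the rewrite author's own statement) =====
-- stated objective: simpler
-- what changed: Replaces A's three passes (bounds filter into parallel lists, nested collect of obstacle hits into t-lists, then a pop/break removal pass) with one loop over the 8 king offsets filtering inline against an obstacle set built once.
-- outside the precondition, e.g. on cordenadas_XY_Rey(-5, -5, [], 3, 3): A returns [[], []], B raises IndexError
import Mathlib
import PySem

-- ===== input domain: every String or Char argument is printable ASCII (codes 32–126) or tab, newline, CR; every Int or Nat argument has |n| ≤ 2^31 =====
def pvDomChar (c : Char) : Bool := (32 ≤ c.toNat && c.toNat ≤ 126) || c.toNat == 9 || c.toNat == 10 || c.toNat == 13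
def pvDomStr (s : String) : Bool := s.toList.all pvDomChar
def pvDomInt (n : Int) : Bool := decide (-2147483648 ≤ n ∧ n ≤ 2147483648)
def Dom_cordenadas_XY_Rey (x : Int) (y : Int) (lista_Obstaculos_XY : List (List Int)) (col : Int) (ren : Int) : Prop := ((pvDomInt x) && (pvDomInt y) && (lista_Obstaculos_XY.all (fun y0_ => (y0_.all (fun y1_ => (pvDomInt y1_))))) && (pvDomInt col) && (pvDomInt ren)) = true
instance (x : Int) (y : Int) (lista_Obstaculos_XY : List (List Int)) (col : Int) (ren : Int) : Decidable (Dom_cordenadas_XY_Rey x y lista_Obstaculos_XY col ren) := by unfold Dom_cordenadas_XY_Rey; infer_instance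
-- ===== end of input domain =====

-- B replaces A's three passes (bounds filter, nested obstacle-hit collection, pop/break removal)
-- with one loop over the 8 king offsets filtering inline against an obstacle set built once (objective: simpler).

-- ===== PORT A =====
-- A's inner removal loop 'for w in range(len(a_x)): if match: pop both; break':
-- scan the two parallel lists together, drop both entries at the first index whose
-- pair equals (tx, ty), stop there; unchanged if no index matches.
def pvPopFirst (tx ty : Int) : List Int → List Int → List Int × List Int
  | [], ly => ([], ly)
  | lx, [] => (lx, [])
  | a :: lx, b :: ly =>
    if a = tx ∧ b = ty then (lx, ly)
    else
      let r := pvPopFirst tx ty lx ly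
      (a :: r.1, b :: r.2)

-- Index loops 'for g in range(len(l_x))' reading l_x[g], l_y[g] in parallel are ported as
-- folds over the zipped pair list (exact: the parallel lists always have equal length, and
-- the f-loop runs over range(len(lista[1])) with len(lista[1]) ≤ len(lista[0]) under Pre_).
-- lista[0] / lista[1] are pyGetD, in range under Pre_ (outside Pre_ Python A raises).
def cordenadas_XY_Rey (x : Int) (y : Int) (lista_Obstaculos_XY : List (List Int)) (col : Int) (ren : Int) : List (List Int) :=
  let l_x : List Int := [x, x - 1, x + 1, x - 1, x, x - 1, x + 1, x + 1]
  let l_y : List Int := [y - 1, y, y, y + 1, y + 1, y - 1, y + 1, y - 1]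
  let s1 := (l_x.zip l_y).foldl
    (fun (s : List Int × List Int) p =>
      if p.1 ≥ 0 ∧ p.1 < ren ∧ p.2 ≥ 0 ∧ p.2 < col then (s.1 ++ [p.1], s.2 ++ [p.2]) else s)
    ([], [])
  let a_x := s1.1
  let a_y := s1.2
  let o0 := PySem.List.pyGetD lista_Obstaculos_XY 0 []
  let o1 := PySem.List.pyGetD lista_Obstaculos_XY 1 []
  let s2 := (a_x.zip a_y).foldl
    (fun s p =>
      (o0.zip o1).foldl
        (fun (s' : List Int × List Int) q =>
          if p.1 = q.1 ∧ p.2 = q.2 then (s'.1 ++ [p.1], s'.2 ++ [p.2]) else s') s)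
    ([], [])
  let s3 := (s2.1.zip s2.2).foldl
    (fun (s : List Int × List Int) q => pvPopFirst q.1 q.2 s.1 s.2) (a_x, a_y)
  [s3.1, s3.2]

-- ===== PORT B =====
-- Source B: obstacle set built once from range(len(lista[1])), then ONE loop over the 8 king
-- offsets appending in-bounds, non-obstacle neighbors to xs / ys.
def cordenadas_XY_Rey_alt (x : Int) (y : Int) (lista_Obstaculos_XY : List (List Int)) (col : Int) (ren : Int) : List (List Int) :=
  let o0 := PySem.List.pyGetD lista_Obstaculos_XY 0 []
  let o1 := PySem.List.pyGetD lista_Obstaculos_XY 1 []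
  let obs : PySem.Set (Int × Int) :=
    PySem.Set.ofList ((PySem.List.pyRange 0 (o1.length : Int) 1).map
      (fun f => (PySem.List.pyGetD o0 f 0, PySem.List.pyGetD o1 f 0)))
  let s := ([((0 : Int), (-1 : Int)), (-1, 0), (1, 0), (-1, 1), (0, 1), (-1, -1), (1, 1), (1, -1)]).foldl
    (fun (s : List Int × List Int) d =>
      let nx := x + d.1
      let ny := y + d.2
      if 0 ≤ nx ∧ nx < ren ∧ 0 ≤ ny ∧ ny < col ∧ ¬ ((nx, ny) ∈ obs) then (s.1 ++ [nx], s.2 ++ [ny]) else s)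
    ([], [])
  [s.1, s.2]

-- ===== PRECONDITION & SPEC =====
-- Pre_ excludes inputs with a malformed obstacle argument (fewer than two rows, or a first
-- row shorter than the second): there Python A raises IndexError whenever some neighbor is
-- in bounds, and on the remaining (no-in-bounds-neighbor) corner A's [[], []] is an accident
-- of never touching the lists — B itself raises on all such inputs while building the set.
def Pre_cordenadas_XY_Rey (x : Int) (y : Int) (lista_Obstaculos_XY : List (List Int)) (col : Int) (ren : Int) : Prop :=
  2 ≤ lista_Obstaculos_XY.length ∧
    (lista_Obstaculos_XY.getD 1 []).length ≤ (lista_Obstaculos_XY.getD 0 []).length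
instance (x : Int) (y : Int) (lista_Obstaculos_XY : List (List Int)) (col : Int) (ren : Int) : Decidable (Pre_cordenadas_XY_Rey x y lista_Obstaculos_XY col ren) := by unfold Pre_cordenadas_XY_Rey; infer_instance

def pvWitness_cordenadas_XY_Rey : Int × Int × List (List Int) × Int × Int := (1, 1, [[2, 0], [2]], 3, 3)

def Spec_cordenadas_XY_Rey (x : Int) (y : Int) (lista_Obstaculos_XY : List (List Int)) (col : Int) (ren : Int) (out : List (List Int)) : Prop := out = cordenadas_XY_Rey_alt x y lista_Obstaculos_XY col ren
instance (x : Int) (y : Int) (lista_Obstaculos_XY : List (List Int)) (col : Int) (ren : Int) (out : List (List Int)) : Decidable (Spec_cordenadas_XY_Rey x y lista_Obstaculos_XY col ren out) := by unfold Spec_cordenadas_XY_Rey; infer_instance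

-- ===== CLAIM (what is proved, stated in full; the proofs are below) =====
def Claim_equal_cordenadas_XY_Rey : Prop := ∀ (x : Int) (y : Int) (lista_Obstaculos_XY : List (List Int)) (col : Int) (ren : Int), Dom_cordenadas_XY_Rey x y lista_Obstaculos_XY col ren → Pre_cordenadas_XY_Rey x y lista_Obstaculos_XY col ren → Spec_cordenadas_XY_Rey x y lista_Obstaculos_XY col ren (cordenadas_XY_Rey x y lista_Obstaculos_XY col ren)

-- ===== LEMMAS AND PROOFS =====

-- the pairs A's collect pass appends to t_x/t_y: each neighbor once per matching obstacle
def pvTList (P N : List (Int × Int)) : List (Int × Int) :=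
  N.flatMap (fun p => List.replicate (P.count p) p)

-- a parallel-append fold from (u, v) is an appended filter-map
theorem pv_parfold (c : Int × Int → Prop) [DecidablePred c] (L : List (Int × Int))
    (u v : List Int) :
    L.foldl (fun (s : List Int × List Int) p =>
        if c p then (s.1 ++ [p.1], s.2 ++ [p.2]) else s) (u, v)
      = (u ++ (L.filter (fun p => decide (c p))).map Prod.fst,
         v ++ (L.filter (fun p => decide (c p))).map Prod.snd) := by
  induction L generalizing u v with
  | nil => simp
  | cons p L ih =>
    by_cases h : c p <;> simp [h, ih]

-- A's inner f-loop over the obstacle pairs appends p once per match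
theorem pv_innerfold (p : Int × Int) (P : List (Int × Int)) (u v : List Int) :
    P.foldl (fun (s' : List Int × List Int) q =>
        if p.1 = q.1 ∧ p.2 = q.2 then (s'.1 ++ [p.1], s'.2 ++ [p.2]) else s') (u, v)
      = (u ++ List.replicate (P.count p) p.1, v ++ List.replicate (P.count p) p.2) := by
  induction P generalizing u v with
  | nil => simp
  | cons q P ih =>
    by_cases h : p.1 = q.1 ∧ p.2 = q.2
    · have hq : q = p := by
        obtain ⟨a, b⟩ := p; obtain ⟨a', b'⟩ := q
        simp_all
      subst hq
      rw [List.foldl_cons, if_pos ⟨rfl, rfl⟩, ih]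
      simp [List.count_cons_self, List.replicate_succ]
    · have hq : ¬ q = p := by
        obtain ⟨a, b⟩ := p; obtain ⟨a', b'⟩ := q
        simp_all [Prod.ext_iff]
        tauto
      simp [h, ih, hq]

-- A's h-loop builds exactly pvTList
theorem pv_tfold (P N : List (Int × Int)) (u v : List Int) :
    N.foldl (fun s p =>
        P.foldl (fun (s' : List Int × List Int) q =>
          if p.1 = q.1 ∧ p.2 = q.2 then (s'.1 ++ [p.1], s'.2 ++ [p.2]) else s') s) (u, v)
      = (u ++ (pvTList P N).map Prod.fst, v ++ (pvTList P N).map Prod.snd) := by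
  induction N generalizing u v with
  | nil => simp [pvTList]
  | cons p N ih =>
    simp only [List.foldl_cons, pv_innerfold, ih, pvTList, List.flatMap_cons]
    simp [List.map_replicate]

theorem pv_mem_tlist (P N : List (Int × Int)) (p : Int × Int) :
    p ∈ pvTList P N ↔ p ∈ N ∧ p ∈ P := by
  simp only [pvTList, List.mem_flatMap, List.mem_replicate]
  constructor
  · rintro ⟨q, hq, hc, rfl⟩
    exact ⟨hq, List.count_pos_iff.mp (Nat.pos_of_ne_zero hc)⟩
  · rintro ⟨hN, hP⟩
    exact ⟨p, hN, (List.count_pos_iff.mpr hP).ne', rfl⟩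

-- pvPopFirst on the two projections of a pair list is erase of the pair
theorem pv_popFirst_map (tx ty : Int) (T : List (Int × Int)) :
    pvPopFirst tx ty (T.map Prod.fst) (T.map Prod.snd)
      = ((T.erase (tx, ty)).map Prod.fst, (T.erase (tx, ty)).map Prod.snd) := by
  induction T with
  | nil => simp [pvPopFirst]
  | cons p T ih =>
    obtain ⟨a, b⟩ := p
    by_cases h : a = tx ∧ b = ty
    · obtain ⟨rfl, rfl⟩ := h
      simp [pvPopFirst]
    · have : ¬ ((a, b) = (tx, ty)) := by simp [Prod.ext_iff]; tauto
      simp [pvPopFirst, h, this, ih]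

-- erasing a then filtering (∉ ts) on a duplicate-free list is one filter
theorem pv_erase_filter (a : Int × Int) (ts : List (Int × Int)) (N : List (Int × Int))
    (hN : N.Nodup) :
    (N.erase a).filter (fun p => decide (p ∉ ts))
      = N.filter (fun p => decide (¬ (p = a ∨ p ∈ ts))) := by
  induction N with
  | nil => simp
  | cons p N ih =>
    rw [List.nodup_cons] at hN
    by_cases hpa : p = a
    · subst hpa
      rw [List.erase_cons_head]
      have hrhs : List.filter (fun q => decide (¬ (q = p ∨ q ∈ ts))) (p :: N)
          = List.filter (fun q => decide (¬ (q = p ∨ q ∈ ts))) N := by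
        rw [List.filter_cons]
        simp
      rw [hrhs]
      apply List.filter_congr
      intro q hq
      have hqp : q ≠ p := fun h => hN.1 (h ▸ hq)
      simp [hqp]
    · rw [List.erase_cons_tail (by simp [hpa])]
      rw [List.filter_cons, List.filter_cons, ih hN.2]
      by_cases hts : p ∈ ts <;> simp [hts, hpa]

-- A's removal pass: fold of erase over any list T, on a duplicate-free N, keeps p ∉ T
theorem pv_erasefold (T N : List (Int × Int)) (hN : N.Nodup) :
    T.foldl (fun n q => n.erase q) N = N.filter (fun p => decide (p ∉ T)) := by
  induction T generalizing N with
  | nil => simp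
  | cons a T ih =>
    rw [List.foldl_cons, ih (N.erase a) (hN.erase a), pv_erase_filter a T N hN]
    apply List.filter_congr
    intro q hq
    simp [List.mem_cons]

-- the parallel pop-fold tracks the pair-level erase-fold
theorem pv_popfold (T N : List (Int × Int)) :
    T.foldl (fun (s : List Int × List Int) q => pvPopFirst q.1 q.2 s.1 s.2)
        (N.map Prod.fst, N.map Prod.snd)
      = ((T.foldl (fun n q => n.erase q) N).map Prod.fst,
         (T.foldl (fun n q => n.erase q) N).map Prod.snd) := by
  induction T generalizing N with
  | nil => simp
  | cons a T ih =>
    rw [List.foldl_cons, List.foldl_cons]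
    have := pv_popFirst_map a.1 a.2 N
    rw [show ((a.1, a.2) : Int × Int) = a from rfl] at this
    rw [this, ih]

theorem pv_zip_fst_snd (l : List (Int × Int)) :
    (l.map Prod.fst).zip (l.map Prod.snd) = l :=
  (List.zip_of_prod rfl rfl).symm

-- B's one-pass loop over the offsets is an appended filter-map of the neighbor pairs
theorem pv_bfold (x y col ren : Int) (S : PySem.Set (Int × Int)) (D : List (Int × Int))
    (u v : List Int) :
    D.foldl (fun (s : List Int × List Int) d =>
        if 0 ≤ x + d.1 ∧ x + d.1 < ren ∧ 0 ≤ y + d.2 ∧ y + d.2 < col ∧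
            ¬ ((x + d.1, y + d.2) ∈ S)
        then (s.1 ++ [x + d.1], s.2 ++ [y + d.2]) else s) (u, v)
      = (u ++ ((D.map (fun d => (x + d.1, y + d.2))).filter
            (fun p => decide (0 ≤ p.1 ∧ p.1 < ren ∧ 0 ≤ p.2 ∧ p.2 < col ∧ ¬ p ∈ S))).map
          Prod.fst,
         v ++ ((D.map (fun d => (x + d.1, y + d.2))).filter
            (fun p => decide (0 ≤ p.1 ∧ p.1 < ren ∧ 0 ≤ p.2 ∧ p.2 < col ∧ ¬ p ∈ S))).map
          Prod.snd) := by
  induction D generalizing u v with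
  | nil => simp
  | cons d D ih =>
    by_cases h : 0 ≤ x + d.1 ∧ x + d.1 < ren ∧ 0 ≤ y + d.2 ∧ y + d.2 < col ∧
        ¬ ((x + d.1, y + d.2) ∈ S) <;>
      simp [h, ih]

-- B's set-comprehension index list is exactly the zipped obstacle pairs
theorem pv_obs_eq (o0 o1 : List Int) (h : o1.length ≤ o0.length) :
    ((PySem.List.pyRange 0 (o1.length : Int) 1).map
        (fun f => (PySem.List.pyGetD o0 f 0, PySem.List.pyGetD o1 f 0)))
      = o0.zip o1 := by
  apply List.ext_getElem
  · simp [PySem.List.length_pyRange_one]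
    omega
  · intro i h1 h2
    have hi1 : i < o1.length := by
      simpa [PySem.List.length_pyRange_one] using h1
    have hi0 : i < o0.length := lt_of_lt_of_le hi1 h
    simp only [List.getElem_map, PySem.List.getElem_pyRange_one, zero_add,
      PySem.List.pyGetD_natCast, List.getElem_zip]
    rw [List.getD_eq_getElem o0 0 hi0, List.getD_eq_getElem o1 0 hi1]

-- ===== VERDICT (by name: the statement is the Claim_ definition above) =====
theorem cordenadas_XY_Rey_spec : Claim_equal_cordenadas_XY_Rey := by
  intro x y lista col ren _hDom hPre
  obtain ⟨hlen, hle⟩ := hPre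
  rcases lista with _ | ⟨o0, _ | ⟨o1, rest⟩⟩
  · simp at hlen
  · simp at hlen
  have hle' : o1.length ≤ o0.length := by simpa using hle
  have hg0 : PySem.List.pyGetD (o0 :: o1 :: rest) (0 : Int) ([] : List Int) = o0 := by
    simp [pysem]
  have hg1 : PySem.List.pyGetD (o0 :: o1 :: rest) (1 : Int) ([] : List Int) = o1 := by
    simp [pysem]
  have hL8nodup : ([(x, y-1), (x-1, y), (x+1, y), (x-1, y+1), (x, y+1), (x-1, y-1),
      (x+1, y+1), (x+1, y-1)] : List (Int × Int)).Nodup := by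
    simp [Prod.ext_iff]
    omega
  have hNnodup : (([(x, y-1), (x-1, y), (x+1, y), (x-1, y+1), (x, y+1), (x-1, y-1),
      (x+1, y+1), (x+1, y-1)] : List (Int × Int)).filter
        (fun p => decide (p.1 ≥ 0 ∧ p.1 < ren ∧ p.2 ≥ 0 ∧ p.2 < col))).Nodup :=
    hL8nodup.filter _
  have hmap : ([(x, y-1), (x-1, y), (x+1, y), (x-1, y+1), (x, y+1), (x-1, y-1),
      (x+1, y+1), (x+1, y-1)] : List (Int × Int))
      = ([((0 : Int), (-1 : Int)), (-1, 0), (1, 0), (-1, 1), (0, 1), (-1, -1), (1, 1),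
          (1, -1)]).map (fun d => (x + d.1, y + d.2)) := by
    simp [Prod.ext_iff]
    omega
  -- B reduced to a single filter over the 8 neighbor pairs
  have hB : cordenadas_XY_Rey_alt x y (o0 :: o1 :: rest) col ren =
      [(([(x, y-1), (x-1, y), (x+1, y), (x-1, y+1), (x, y+1), (x-1, y-1), (x+1, y+1),
          (x+1, y-1)] : List (Int × Int)).filter
          (fun p => decide (0 ≤ p.1 ∧ p.1 < ren ∧ 0 ≤ p.2 ∧ p.2 < col ∧
            ¬ p ∈ PySem.Set.ofList (o0.zip o1)))).map Prod.fst,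
       (([(x, y-1), (x-1, y), (x+1, y), (x-1, y+1), (x, y+1), (x-1, y-1), (x+1, y+1),
          (x+1, y-1)] : List (Int × Int)).filter
          (fun p => decide (0 ≤ p.1 ∧ p.1 < ren ∧ 0 ≤ p.2 ∧ p.2 < col ∧
            ¬ p ∈ PySem.Set.ofList (o0.zip o1)))).map Prod.snd] := by
    simp only [cordenadas_XY_Rey_alt, hg0, hg1, pv_obs_eq o0 o1 hle', pv_bfold]
    rw [← hmap]
    simp
  -- A reduced to the same single filter
  have hA : cordenadas_XY_Rey x y (o0 :: o1 :: rest) col ren =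
      [(([(x, y-1), (x-1, y), (x+1, y), (x-1, y+1), (x, y+1), (x-1, y-1), (x+1, y+1),
          (x+1, y-1)] : List (Int × Int)).filter
          (fun p => decide (0 ≤ p.1 ∧ p.1 < ren ∧ 0 ≤ p.2 ∧ p.2 < col ∧
            ¬ p ∈ PySem.Set.ofList (o0.zip o1)))).map Prod.fst,
       (([(x, y-1), (x-1, y), (x+1, y), (x-1, y+1), (x, y+1), (x-1, y-1), (x+1, y+1),
          (x+1, y-1)] : List (Int × Int)).filter
          (fun p => decide (0 ≤ p.1 ∧ p.1 < ren ∧ 0 ≤ p.2 ∧ p.2 < col ∧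
            ¬ p ∈ PySem.Set.ofList (o0.zip o1)))).map Prod.snd] := by
    simp only [cordenadas_XY_Rey, hg0, hg1, List.zip_cons_cons, List.zip_nil_left]
    rw [pv_parfold (fun p : Int × Int => p.1 ≥ 0 ∧ p.1 < ren ∧ p.2 ≥ 0 ∧ p.2 < col)]
    simp only [List.nil_append, pv_zip_fst_snd]
    rw [pv_tfold]
    simp only [List.nil_append, pv_zip_fst_snd]
    rw [pv_popfold, pv_erasefold _ _ hNnodup]
    have h1 : (([(x, y-1), (x-1, y), (x+1, y), (x-1, y+1), (x, y+1), (x-1, y-1),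
        (x+1, y+1), (x+1, y-1)] : List (Int × Int)).filter
          (fun p => decide (p.1 ≥ 0 ∧ p.1 < ren ∧ p.2 ≥ 0 ∧ p.2 < col))).filter
        (fun p => decide (p ∉ pvTList (o0.zip o1)
          (([(x, y-1), (x-1, y), (x+1, y), (x-1, y+1), (x, y+1), (x-1, y-1),
            (x+1, y+1), (x+1, y-1)] : List (Int × Int)).filter
              (fun p => decide (p.1 ≥ 0 ∧ p.1 < ren ∧ p.2 ≥ 0 ∧ p.2 < col)))))
        = ([(x, y-1), (x-1, y), (x+1, y), (x-1, y+1), (x, y+1), (x-1, y-1), (x+1, y+1),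
            (x+1, y-1)] : List (Int × Int)).filter
            (fun p => decide (0 ≤ p.1 ∧ p.1 < ren ∧ 0 ≤ p.2 ∧ p.2 < col ∧
              ¬ p ∈ PySem.Set.ofList (o0.zip o1))) := by
      rw [List.filter_congr (q := fun p => decide (p ∉ o0.zip o1))
        (fun p hp => by
          rw [decide_eq_decide]
          simp only [pv_mem_tlist]
          tauto)]
      rw [List.filter_filter]
      apply List.filter_congr
      intro p hp
      rw [← Bool.decide_and, decide_eq_decide]
      simp only [PySem.Set.mem_ofList, ge_iff_le]
      tauto
    rw [h1]
  simp only [Spec_cordenadas_XY_Rey]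
  rw [hA, hB]
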